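-- pv_equiv track=rewrite | github.com/openmm/openmm | tests/uma_ice_rpmd/lammps/run_lammps_uma_ice.py | _split_minimize_then_md
-- ===== SOURCE A (Python) =====
-- def _split_minimize_then_md(script: str) -> tuple[list[str], list[str]]:
--     """Lines before first 'minimize' → pre (no ML forces). Rest → post (ML + min + MD)."""
--     lines = script.splitlines()
--     pre: list[str] = []
--     post: list[str] = []
--     seen_min = False
--     for line in lines:
--         if line.strip().startswith("#"):
--             (post if seen_min else pre).append(line)
--             continue
--         if not seen_min and line.strip().lower().startswith("minimize"):
--             seen_min = True
--         if seen_min: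
--             post.append(line)
--         else:
--             pre.append(line)
--     if not seen_min:
--         # No minimize: behave like fairchem (only "run" after external — we still need external first)
--         pre = []
--         post = []
--         for line in lines:
--             s = line.strip()
--             if s.startswith("run ") or s == "run":
--                 post.append(line)
--             else:
--                 pre.append(line)
--     return pre, post
-- ===== SOURCE B (Python) =====
-- def _split_minimize_then_md(script: str) -> tuple[list[str], list[str]]:
--     lines = script.splitlines()
--     idx = next((i for i, l in enumerate(lines)
--                 if not l.strip().startswith("#")
--                 and l.strip().lower().startswith("minimize")), None)
--     if idx is not None:
--         return lines[:idx], lines[idx:]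
--     is_run = lambda l: l.strip() == "run" or l.strip().startswith("run ")
--     return [l for l in lines if not is_run(l)], [l for l in lines if is_run(l)]
-- ===== Notes on version B (the rewrite author's own statement) =====
-- stated objective: simpler
-- what changed: Replaces the stateful seen_min flag-and-accumulate loop (plus accumulator fallback loop) with locating the first minimize line by index and slicing the list there, and, when absent, partitioning via two filter comprehensions.
import Mathlib
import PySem

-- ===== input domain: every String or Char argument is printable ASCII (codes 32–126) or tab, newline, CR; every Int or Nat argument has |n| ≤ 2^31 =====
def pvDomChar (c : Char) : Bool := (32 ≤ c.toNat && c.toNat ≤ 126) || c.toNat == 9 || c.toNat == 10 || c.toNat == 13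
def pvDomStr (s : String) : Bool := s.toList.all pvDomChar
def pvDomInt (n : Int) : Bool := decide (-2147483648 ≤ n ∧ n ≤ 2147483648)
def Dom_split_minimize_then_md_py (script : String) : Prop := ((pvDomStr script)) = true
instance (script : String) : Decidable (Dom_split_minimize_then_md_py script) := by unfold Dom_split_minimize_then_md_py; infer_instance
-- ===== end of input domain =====

-- B locates the first minimize line by index and slices there (filters for the no-minimize
-- fallback) instead of A's stateful seen_min flag-and-accumulate loops; objective: simpler.


-- ===== PORT A =====
-- one step of A's main loop over state (pre, post, seen_min)
def pvAStep (st : List String × List String × Bool) (line : String) : List String × List String × Bool :=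
  let pre := st.1; let post := st.2.1; let seen := st.2.2
  if PySem.Str.startswith (PySem.Str.strip line) "#" then
    if seen then (pre, post ++ [line], seen) else (pre ++ [line], post, seen)
  else
    let seen' := if !seen && PySem.Str.startswith (PySem.Str.lower (PySem.Str.strip line)) "minimize" then true else seen
    if seen' then (pre, post ++ [line], seen') else (pre ++ [line], post, seen')

-- one step of A's fallback loop over state (pre, post)
def pvARunStep (st : List String × List String) (line : String) : List String × List String :=
  let s := PySem.Str.strip line
  if PySem.Str.startswith s "run " || s == "run" then (st.1, st.2 ++ [line]) else (st.1 ++ [line], st.2)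

def split_minimize_then_md_py (script : String) : List String × List String :=
  let lines := PySem.Str.splitlines script
  let r := lines.foldl pvAStep ([], [], false)
  if r.2.2 then (r.1, r.2.1)
  else lines.foldl pvARunStep ([], [])

-- ===== PORT B =====
def pvIsMin (line : String) : Bool :=
  !PySem.Str.startswith (PySem.Str.strip line) "#"
    && PySem.Str.startswith (PySem.Str.lower (PySem.Str.strip line)) "minimize"

def pvIsRun (line : String) : Bool :=
  PySem.Str.strip line == "run" || PySem.Str.startswith (PySem.Str.strip line) "run "

def split_minimize_then_md_py_alt (script : String) : List String × List String :=
  let lines := PySem.Str.splitlines script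
  match lines.findIdx? pvIsMin with
  | some i => (lines.take i, lines.drop i)
  | none => (lines.filter (fun l => !pvIsRun l), lines.filter pvIsRun)

-- ===== PRECONDITION & SPEC =====
def Spec_split_minimize_then_md_py (script : String) (out : List String × List String) : Prop := out = split_minimize_then_md_py_alt script
instance (script : String) (out : List String × List String) : Decidable (Spec_split_minimize_then_md_py script out) := by unfold Spec_split_minimize_then_md_py; infer_instance

-- ===== CLAIM (what is proved, stated in full; the proofs are below) =====
def Claim_equal_split_minimize_then_md_py : Prop := ∀ (script : String), Dom_split_minimize_then_md_py script → Spec_split_minimize_then_md_py script (split_minimize_then_md_py script)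

-- ===== LEMMAS AND PROOFS =====

-- once seen_min is set, every remaining line goes to post
theorem pvA_seen (lines : List String) (pre post : List String) :
    lines.foldl pvAStep (pre, post, true) = (pre, post ++ lines, true) := by
  induction lines generalizing post with
  | nil => simp
  | cons l ls ih =>
    simp only [List.foldl_cons]
    have h : pvAStep (pre, post, true) l = (pre, post ++ [l], true) := by
      simp [pvAStep]
    rw [h, ih]
    simp

-- A's main loop characterised by the first index of a minimize line
theorem pvA_main (lines : List String) (pre post : List String) :
    lines.foldl pvAStep (pre, post, false) =
      match lines.findIdx? pvIsMin with
      | some i => (pre ++ lines.take i, post ++ lines.drop i, true)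
      | none => (pre ++ lines, post, false) := by
  induction lines generalizing pre with
  | nil => simp
  | cons l ls ih =>
    simp only [List.foldl_cons, List.findIdx?_cons]
    cases hc : PySem.Chars.startswith (PySem.Chars.strip l.toList) ['#'] with
    | true =>
      have hm : pvIsMin l = false := by simp [pvIsMin, hc]
      have hstep : pvAStep (pre, post, false) l = (pre ++ [l], post, false) := by
        simp [pvAStep, hc]
      rw [hstep, ih]
      cases h : ls.findIdx? pvIsMin <;> simp [hm]
    | false =>
      cases hp : PySem.Chars.startswith (PySem.Chars.lower (PySem.Chars.strip l.toList))
          ['m','i','n','i','m','i','z','e'] with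
      | true =>
        have hm : pvIsMin l = true := by simp [pvIsMin, hc, hp]
        have hstep : pvAStep (pre, post, false) l = (pre, post ++ [l], true) := by
          simp [pvAStep, hc, hp]
        rw [hstep, pvA_seen]
        simp [hm]
      | false =>
        have hm : pvIsMin l = false := by simp [pvIsMin, hc, hp]
        have hstep : pvAStep (pre, post, false) l = (pre ++ [l], post, false) := by
          simp [pvAStep, hc, hp]
        rw [hstep, ih]
        cases h : ls.findIdx? pvIsMin <;> simp [hm]

-- A's fallback loop equals the pair of filters B builds
theorem pvA_run (lines : List String) (pre post : List String) :
    lines.foldl pvARunStep (pre, post) =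
      (pre ++ lines.filter (fun l => !pvIsRun l), post ++ lines.filter pvIsRun) := by
  induction lines generalizing pre post with
  | nil => simp
  | cons l ls ih =>
    simp only [List.foldl_cons]
    by_cases heq : PySem.Str.strip l = "run"
    · have hr : pvIsRun l = true := by simp [pvIsRun, heq]
      have h : pvARunStep (pre, post) l = (pre, post ++ [l]) := by
        simp [pvARunStep, heq]
      rw [h, ih]
      simp [hr]
    · cases hs : PySem.Chars.startswith (PySem.Chars.strip l.toList) ['r','u','n',' '] with
      | true =>
        have hr : pvIsRun l = true := by simp [pvIsRun, hs]
        have h : pvARunStep (pre, post) l = (pre, post ++ [l]) := by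
          simp [pvARunStep, hs]
        rw [h, ih]
        simp [hr]
      | false =>
        have hr : pvIsRun l = false := by simp [pvIsRun, hs, heq]
        have h : pvARunStep (pre, post) l = (pre ++ [l], post) := by
          simp [pvARunStep, hs, heq]
        rw [h, ih]
        simp [hr]

-- ===== VERDICT (by name: the statement is the Claim_ definition above) =====
theorem split_minimize_then_md_py_spec : Claim_equal_split_minimize_then_md_py := by
  intro script _
  unfold Spec_split_minimize_then_md_py split_minimize_then_md_py split_minimize_then_md_py_alt
  dsimp only
  rw [pvA_main]
  cases h : (PySem.Str.splitlines script).findIdx? pvIsMin with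
  | some i => simp
  | none => simp [pvA_run]
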